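-- pv_equiv track=rewrite | github.com/Jeanzalez/Soluciones-de-Online-Judge---UVA | books.py | validacion
-- ===== SOURCE A (Python) =====
-- def validacion(lista,capacidadEvaluar,cantEscribas):
--     val=False
--     contEscriba=0
--     j = 0
--     acumTotal = 0
--     while(contEscriba<cantEscribas):
--         acumuladorEscriba=0
--         while(j < len(lista) and acumuladorEscriba+lista[j] <= capacidadEvaluar):
--             acumuladorEscriba+=lista[j]
--             j+=1
--         acumTotal += acumuladorEscriba
--         contEscriba+=1
--     if(j == len(lista)):
--         val=True
--     else:
--         val=False
--     return val
-- ===== SOURCE B (Python) =====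
-- def validacion(lista, capacidadEvaluar, cantEscribas):
--     # Empty workload: trivially fine, no scribe needed.
--     if not lista:
--         return True
--     used = 0
--     rem = None  # remaining capacity of the currently open scribe (None = none open)
--     for x in lista:
--         if rem is not None and x <= rem:
--             rem -= x
--         elif x <= capacidadEvaluar:
--             used += 1
--             rem = capacidadEvaluar - x
--         else:
--             return False  # this item can never be placed by any scribe
--     return used <= cantEscribas
-- ===== Notes on version B (the rewrite author's own statement) =====
-- stated objective: simpler
-- what changed: B replaces A's nested loops (an outer loop simulating each of the cantEscribas scribes, an inner loop accumulating items by index) with one flat for-loop over the items driving a two-field state machine (remaining capacity of the open scribe, scribes opened so far), then compares the count with cantEscribas; no index arithmetic, no per-scribe simulation, and an early False on an unplaceable item.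
import Mathlib
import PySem

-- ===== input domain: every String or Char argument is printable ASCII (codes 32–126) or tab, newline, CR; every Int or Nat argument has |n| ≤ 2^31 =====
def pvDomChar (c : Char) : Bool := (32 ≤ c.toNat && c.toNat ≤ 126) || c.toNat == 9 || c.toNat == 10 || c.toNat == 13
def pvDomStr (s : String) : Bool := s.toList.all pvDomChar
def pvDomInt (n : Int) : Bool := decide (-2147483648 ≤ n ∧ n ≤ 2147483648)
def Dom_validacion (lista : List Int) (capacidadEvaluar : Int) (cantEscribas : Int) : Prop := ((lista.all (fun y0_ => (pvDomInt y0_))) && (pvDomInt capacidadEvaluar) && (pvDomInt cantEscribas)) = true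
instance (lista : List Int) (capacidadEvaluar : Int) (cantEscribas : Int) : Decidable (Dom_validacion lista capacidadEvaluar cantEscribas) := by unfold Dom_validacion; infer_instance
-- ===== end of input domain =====

-- B: one flat pass over the items with a (remaining-capacity, scribes-used) state machine,
-- then compare the count with cantEscribas, instead of A's nested per-scribe simulation; simpler.
-- A's loops are rendered as fuel recursion: each loop's fuel is exactly its iteration count.

-- ===== PORT A =====
-- inner while loop: while j < len(lista) and acumuladorEscriba+lista[j] <= capacidadEvaluar
-- (fuel = lista.length - j at every call: enough for the remaining iterations)
def validacion_inner (lista : List Int) (capacidadEvaluar : Int) : Nat → Nat → Int → Nat × Int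
  | 0, j, acum => (j, acum)
  | fuel + 1, j, acum =>
    if h : j < lista.length then
      if acum + lista[j] ≤ capacidadEvaluar then
        validacion_inner lista capacidadEvaluar fuel (j + 1) (acum + lista[j])
      else (j, acum)
    else (j, acum)

-- outer while loop: while contEscriba < cantEscribas (fuel = (cantEscribas - contEscriba).toNat)
def validacion_outer (lista : List Int) (capacidadEvaluar : Int) (cantEscribas : Int) :
    Nat → Int → Nat → Int → Nat
  | 0, _, j, _ => j
  | fuel + 1, contEscriba, j, acumTotal =>
    if contEscriba < cantEscribas then
      let p := validacion_inner lista capacidadEvaluar (lista.length - j) j 0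
      validacion_outer lista capacidadEvaluar cantEscribas fuel (contEscriba + 1) p.1 (acumTotal + p.2)
    else j

def validacion (lista : List Int) (capacidadEvaluar : Int) (cantEscribas : Int) : Bool :=
  decide (validacion_outer lista capacidadEvaluar cantEscribas cantEscribas.toNat 0 0 0 = lista.length)

-- ===== PORT B =====
-- the for-loop of B: state = (rem : Option Int = open scribe's remaining capacity, used : Nat);
-- `none` result = B's early `return False` on an unplaceable item
def validacion_alt_go (cap : Int) : List Int → Option Int → Nat → Option Nat
  | [], _, used => some used
  | x :: xs, some r, used =>
    if x ≤ r then validacion_alt_go cap xs (some (r - x)) used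
    else if x ≤ cap then validacion_alt_go cap xs (some (cap - x)) (used + 1)
    else none
  | x :: xs, none, used =>
    if x ≤ cap then validacion_alt_go cap xs (some (cap - x)) (used + 1)
    else none

def validacion_alt (lista : List Int) (capacidadEvaluar : Int) (cantEscribas : Int) : Bool :=
  if lista.isEmpty then true
  else
    match validacion_alt_go capacidadEvaluar lista none 0 with
    | none => false
    | some used => decide ((used : Int) ≤ cantEscribas)

-- ===== PRECONDITION & SPEC =====
def Spec_validacion (lista : List Int) (capacidadEvaluar : Int) (cantEscribas : Int) (out : Bool) : Prop := out = validacion_alt lista capacidadEvaluar cantEscribas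
instance (lista : List Int) (capacidadEvaluar : Int) (cantEscribas : Int) (out : Bool) : Decidable (Spec_validacion lista capacidadEvaluar cantEscribas out) := by unfold Spec_validacion; infer_instance

-- ===== CLAIM (what is proved, stated in full; the proofs are below) =====
def Claim_equal_validacion : Prop := ∀ (lista : List Int) (capacidadEvaluar : Int) (cantEscribas : Int), Dom_validacion lista capacidadEvaluar cantEscribas → Spec_validacion lista capacidadEvaluar cantEscribas (validacion lista capacidadEvaluar cantEscribas)

-- ===== LEMMAS AND PROOFS =====

-- one outer-loop iteration of A, as a function of the index only
def pvStep (lista : List Int) (cap : Int) (j : Nat) : Nat :=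
  (validacion_inner lista cap (lista.length - j) j 0).1

theorem step_big (lista : List Int) (cap : Int) (j : Nat) (h : ¬ j < lista.length) :
    pvStep lista cap j = j := by
  unfold pvStep
  have h0 : lista.length - j = 0 := by omega
  rw [h0]
  rfl

theorem step_stuck (lista : List Int) (cap : Int) (j : Nat) (h : j < lista.length)
    (hc : cap < lista[j]) : pvStep lista cap j = j := by
  unfold pvStep
  obtain ⟨f, hf⟩ : ∃ f, lista.length - j = f + 1 := ⟨lista.length - j - 1, by omega⟩
  rw [hf]
  simp only [validacion_inner, h, dif_pos]
  rw [if_neg (show ¬ (0 : Int) + lista[j] ≤ cap by omega)]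

theorem outer_eq_iterate (lista : List Int) (cap : Int) (cant : Int) :
    ∀ (n : Nat) (cont : Int) (j : Nat) (acc : Int), (cant - cont).toNat = n →
      validacion_outer lista cap cant n cont j acc = (pvStep lista cap)^[n] j := by
  intro n
  induction n with
  | zero => intro cont j acc _; rfl
  | succ n ih =>
      intro cont j acc hn
      have hlt : cont < cant := by omega
      simp only [validacion_outer, hlt, if_pos]
      rw [ih (cont + 1) _ _ (by omega), Function.iterate_succ_apply]
      rfl

-- when the next item does not fit the open scribe (or there is none left), the go-state
-- `some r` behaves exactly like `none`
theorem go_reset (cap : Int) (xs : List Int) (r : Int) (used : Nat)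
    (h : ∀ x ∈ xs.head?, ¬ x ≤ r) :
    validacion_alt_go cap xs (some r) used = validacion_alt_go cap xs none used := by
  cases xs with
  | nil => rfl
  | cons x xs =>
      have hx : ¬ x ≤ r := h x rfl
      simp only [validacion_alt_go, if_neg hx]

-- A's inner loop, run with exact fuel, is simulated by go on the corresponding suffix
theorem inner_sim (lista : List Int) (cap : Int) :
    ∀ (fuel j : Nat) (a : Int) (used : Nat), fuel = lista.length - j → j ≤ lista.length →
      ∃ j' a', validacion_inner lista cap fuel j a = (j', a') ∧
        validacion_alt_go cap (lista.drop j) (some (cap - a)) used =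
          validacion_alt_go cap (lista.drop j') (some (cap - a')) used ∧
        j ≤ j' ∧ j' ≤ lista.length ∧
        (j' = lista.length ∨ cap < a' + lista.getD j' 0) := by
  intro fuel
  induction fuel with
  | zero =>
      intro j a used hf hj
      have hjl : j = lista.length := by omega
      exact ⟨j, a, rfl, rfl, Nat.le_refl _, by omega, Or.inl hjl⟩
  | succ f ih =>
      intro j a used hf hj
      have hjlt : j < lista.length := by omega
      by_cases hx : a + lista[j] ≤ cap
      · obtain ⟨j', a', hp, hgo, hle1, hle2, hlast⟩ := ih (j + 1) (a + lista[j]) used (by omega) (by omega)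
        refine ⟨j', a', ?_, ?_, by omega, hle2, hlast⟩
        · simp only [validacion_inner, dif_pos hjlt, if_pos hx]
          exact hp
        · have hdrop : lista.drop j = lista[j] :: lista.drop (j + 1) :=
            List.drop_eq_getElem_cons hjlt
          have hfit : lista[j] ≤ cap - a := by omega
          rw [hdrop]
          simp only [validacion_alt_go, if_pos hfit]
          have : cap - a - lista[j] = cap - (a + lista[j]) := by ring
          rw [this]
          exact hgo
      · refine ⟨j, a, ?_, rfl, Nat.le_refl _, by omega, Or.inr ?_⟩
        · simp only [validacion_inner, dif_pos hjlt, if_neg hx]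
        · rw [List.getD_eq_getElem lista 0 hjlt]
          omega

-- the count go returns is at least the running count
theorem go_ge (cap : Int) :
    ∀ (xs : List Int) (s : Option Int) (used m : Nat),
      validacion_alt_go cap xs s used = some m → used ≤ m := by
  intro xs
  induction xs with
  | nil =>
      intro s used m h
      cases s <;> simp only [validacion_alt_go, Option.some.injEq] at h <;> omega
  | cons x xs ih =>
      intro s used m h
      cases s with
      | some r =>
          simp only [validacion_alt_go] at h
          split_ifs at h with h1 h2
          · exact ih _ _ _ h
          · have := ih _ _ _ h; omega
      | none =>
          simp only [validacion_alt_go] at h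
          split_ifs at h with h1
          have := ih _ _ _ h; omega

-- one scribe of A = one `none`-state transition of go
theorem scribe_step (lista : List Int) (cap : Int) (j used : Nat)
    (hj : j < lista.length) (hx : lista[j] ≤ cap) :
    validacion_alt_go cap (lista.drop j) none used =
      validacion_alt_go cap (lista.drop (pvStep lista cap j)) none (used + 1)
    ∧ j < pvStep lista cap j ∧ pvStep lista cap j ≤ lista.length := by
  have hdrop : lista.drop j = lista[j] :: lista.drop (j + 1) := List.drop_eq_getElem_cons hj
  obtain ⟨j', a', hp, hgo, hle1, hle2, hlast⟩ :=
    inner_sim lista cap (lista.length - (j + 1)) (j + 1) lista[j] (used + 1) rfl (by omega)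
  have hpv : pvStep lista cap j = j' := by
    unfold pvStep
    obtain ⟨f, hf⟩ : ∃ f, lista.length - j = f + 1 := ⟨lista.length - j - 1, by omega⟩
    rw [hf]
    simp only [validacion_inner, dif_pos hj]
    rw [if_pos (show (0 : Int) + lista[j] ≤ cap by omega), zero_add]
    have hfe : f = lista.length - (j + 1) := by omega
    rw [hfe, hp]
  have hstep : validacion_alt_go cap (lista.drop j) none used =
      validacion_alt_go cap (lista.drop (j + 1)) (some (cap - lista[j])) (used + 1) := by
    rw [hdrop]; simp only [validacion_alt_go, if_pos hx]
  refine ⟨?_, by omega, by omega⟩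
  rw [hstep, hgo, hpv]
  apply go_reset
  intro y hy
  rcases hlast with h4 | h4
  · rw [h4, List.drop_length] at hy; simp at hy
  · have hlt : j' < lista.length := by
      by_contra hge
      rw [List.drop_eq_nil_of_le (by omega)] at hy
      simp at hy
    have hyv : y = lista[j'] := by
      rw [List.drop_eq_getElem_cons hlt] at hy
      simp only [List.head?_cons, Option.mem_def, Option.some.injEq] at hy
      exact hy.symm
    rw [List.getD_eq_getElem lista 0 hlt] at h4
    subst hyv
    omega

-- main characterisation: go's verdict from index j determines A's iterate behaviour
theorem go_none_iterate (lista : List Int) (cap : Int) :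
    ∀ (n j used : Nat), lista.length - j ≤ n → j ≤ lista.length →
      validacion_alt_go cap (lista.drop j) none used = none →
      ∀ k, (pvStep lista cap)^[k] j < lista.length := by
  intro n
  induction n with
  | zero =>
      intro j used h hle hnone k
      have : j = lista.length := by omega
      subst this
      rw [List.drop_length] at hnone
      exact absurd hnone (by simp [validacion_alt_go])
  | succ n ih =>
      intro j used h hle hnone k
      by_cases hj : j < lista.length
      · by_cases hx : lista[j] ≤ cap
        · obtain ⟨heq, hlt, hle'⟩ := scribe_step lista cap j used hj hx
          rw [heq] at hnone
          match k with
          | 0 => simpa using hj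
          | k + 1 =>
              rw [Function.iterate_succ_apply]
              exact ih (pvStep lista cap j) (used + 1) (by omega) hle' hnone k
        · rw [Function.iterate_fixed (step_stuck lista cap j hj (by omega))]
          exact hj
      · have : j = lista.length := by omega
        subst this
        rw [List.drop_length] at hnone
        exact absurd hnone (by simp [validacion_alt_go])

theorem go_some_iterate (lista : List Int) (cap : Int) :
    ∀ (n j used m : Nat), lista.length - j ≤ n → j ≤ lista.length →
      validacion_alt_go cap (lista.drop j) none used = some m →
      ∀ k, (m - used ≤ k → (pvStep lista cap)^[k] j = lista.length) ∧
           (k < m - used → (pvStep lista cap)^[k] j < lista.length) := by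
  intro n
  induction n with
  | zero =>
      intro j used m h hle hsome k
      have hj : j = lista.length := by omega
      subst hj
      rw [List.drop_length] at hsome
      simp only [validacion_alt_go, Option.some.injEq] at hsome
      subst hsome
      refine ⟨fun _ => Function.iterate_fixed (step_big lista cap _ (by omega)) k, fun hk => by omega⟩
  | succ n ih =>
      intro j used m h hle hsome k
      by_cases hj : j < lista.length
      · by_cases hx : lista[j] ≤ cap
        · obtain ⟨heq, hlt, hle'⟩ := scribe_step lista cap j used hj hx
          rw [heq] at hsome
          have hm : used + 1 ≤ m := go_ge cap _ _ _ _ hsome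
          have ih' := ih (pvStep lista cap j) (used + 1) m (by omega) hle' hsome
          constructor
          · intro hk
            match k with
            | 0 => omega
            | k + 1 =>
                rw [Function.iterate_succ_apply]
                exact (ih' k).1 (by omega)
          · intro hk
            match k with
            | 0 => simpa using hj
            | k + 1 =>
                rw [Function.iterate_succ_apply]
                exact (ih' k).2 (by omega)
        · have hdrop : lista.drop j = lista[j] :: lista.drop (j + 1) := List.drop_eq_getElem_cons hj
          rw [hdrop] at hsome
          simp only [validacion_alt_go, if_neg (show ¬ lista[j] ≤ cap from hx)] at hsome
          exact absurd hsome (by simp)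
      · have : j = lista.length := by omega
        subst this
        rw [List.drop_length] at hsome
        simp only [validacion_alt_go, Option.some.injEq] at hsome
        subst hsome
        refine ⟨fun _ => Function.iterate_fixed (step_big lista cap _ (by omega)) k, fun hk => by omega⟩

-- ===== VERDICT (by name: the statement is the Claim_ definition above) =====
theorem validacion_spec : Claim_equal_validacion := by
  intro lista cap cant _dom
  unfold Spec_validacion validacion validacion_alt
  rw [outer_eq_iterate lista cap cant cant.toNat 0 0 0 (by omega)]
  by_cases hemp : lista.isEmpty
  · have h0 : lista.length = 0 := by simpa [List.isEmpty_iff_length_eq_zero] using hemp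
    have hfix : (pvStep lista cap)^[cant.toNat] 0 = 0 :=
      Function.iterate_fixed (step_big lista cap 0 (by omega)) _
    simp [hemp, hfix, h0]
  · have hpos : 0 < lista.length := by
      rcases lista with _ | ⟨x, xs⟩
      · simp at hemp
      · simp
    simp only [hemp]
    have hdrop0 : lista.drop 0 = lista := List.drop_zero (l := lista)
    cases hC : validacion_alt_go cap lista none 0 with
    | none =>
        have := go_none_iterate lista cap lista.length 0 0 (by omega) (by omega)
          (by rw [hdrop0]; exact hC) cant.toNat
        simp
        omega
    | some m =>
        have hm1 : 1 ≤ m := by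
          rcases lista with _ | ⟨x, xs⟩
          · simp at hpos
          · simp only [validacion_alt_go] at hC
            split_ifs at hC with h1
            exact go_ge cap _ _ _ _ hC
        have hmain := go_some_iterate lista cap lista.length 0 0 m (by omega) (by omega)
          (by rw [hdrop0]; exact hC) cant.toNat
        by_cases hcmp : m ≤ cant.toNat
        · have hfin := hmain.1 (by omega)
          simp [hfin]
          omega
        · have hfin := hmain.2 (by omega)
          simp
          constructor
          · omega
          · omega
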